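-- pv_equiv track=rewrite | github.com/LiangYeJing/ascend_demo | nz_viewer.py | nz_order_indices
-- ===== SOURCE A (Python) =====
-- def nz_order_indices(Hp, Wp, h0, w0):
--     """按『列优先的分形块顺序 + 块内行优先』生成线性索引（行主序索引）"""
--     H1, W1 = Hp // h0, Wp // w0
--     order = []
--     for tile_c in range(W1):          # 列优先（外层）
--         for tile_r in range(H1):
--             base_r = tile_r * h0
--             base_c = tile_c * w0
--             for i in range(h0):       # 块内行优先（内层）
--                 for j in range(w0):
--                     r = base_r + i
--                     c = base_c + j
--                     order.append(r * Wp + c)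
--     return order
-- ===== SOURCE B (Python) =====
-- def nz_order_indices(Hp, Wp, h0, w0):
--     # Single flat loop over output positions: decode each rank k into
--     # (tile_c, tile_r, i, j) by repeated divmod and map it to its row-major index.
--     H1, W1 = Hp // h0, Wp // w0
--     if H1 <= 0 or W1 <= 0 or h0 <= 0 or w0 <= 0:
--         return []
--     n = W1 * H1 * h0 * w0
--     out = []
--     for k in range(n):
--         t, j = divmod(k, w0)
--         t, i = divmod(t, h0)
--         tile_c, tile_r = divmod(t, H1)
--         out.append((tile_r * h0 + i) * Wp + tile_c * w0 + j)
--     return out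
-- ===== Notes on version B (the rewrite author's own statement) =====
-- stated objective: alternative
-- what changed: B replaces A's four-deep nested loops by one flat loop over output ranks k in range(W1*H1*h0*w0), decoding each rank into (tile_c, tile_r, i, j) by repeated divmod and computing the index arithmetically.
import Mathlib
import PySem

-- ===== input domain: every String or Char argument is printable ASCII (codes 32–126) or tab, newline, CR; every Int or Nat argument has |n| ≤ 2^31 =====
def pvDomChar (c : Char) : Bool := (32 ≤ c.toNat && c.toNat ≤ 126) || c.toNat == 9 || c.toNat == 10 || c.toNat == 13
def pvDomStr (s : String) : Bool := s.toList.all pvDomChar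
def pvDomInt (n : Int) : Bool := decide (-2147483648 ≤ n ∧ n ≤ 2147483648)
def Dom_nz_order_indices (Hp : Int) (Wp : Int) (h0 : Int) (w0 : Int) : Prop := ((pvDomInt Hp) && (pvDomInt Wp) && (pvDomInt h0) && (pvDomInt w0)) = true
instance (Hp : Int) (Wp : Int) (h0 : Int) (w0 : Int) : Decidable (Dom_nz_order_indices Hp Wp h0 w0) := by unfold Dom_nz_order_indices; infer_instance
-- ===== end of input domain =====

-- B replaces A's four-deep loop nest by one flat loop over output ranks, decoding each
-- rank into (tile_c, tile_r, i, j) by repeated divmod (alternative decomposition, same cost).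

-- ===== PORT A =====
def nz_order_indices (Hp : Int) (Wp : Int) (h0 : Int) (w0 : Int) : List Int :=
  let H1 := PySem.Int.floordiv Hp h0
  let W1 := PySem.Int.floordiv Wp w0
  (PySem.List.pyRange 0 W1 1).foldl (fun order tile_c =>
    (PySem.List.pyRange 0 H1 1).foldl (fun order tile_r =>
      let base_r := tile_r * h0
      let base_c := tile_c * w0
      (PySem.List.pyRange 0 h0 1).foldl (fun order i =>
        (PySem.List.pyRange 0 w0 1).foldl (fun order j =>
          let r := base_r + i
          let c := base_c + j
          order ++ [r * Wp + c]) order) order) order) []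

-- ===== PORT B =====
-- divmod(x, y) is ported as the pair (floordiv x y, mod x y), exact for y ≠ 0 (guarded).
def nz_order_indices_alt (Hp : Int) (Wp : Int) (h0 : Int) (w0 : Int) : List Int :=
  let H1 := PySem.Int.floordiv Hp h0
  let W1 := PySem.Int.floordiv Wp w0
  if H1 ≤ 0 ∨ W1 ≤ 0 ∨ h0 ≤ 0 ∨ w0 ≤ 0 then [] else
  let n := W1 * H1 * h0 * w0
  (PySem.List.pyRange 0 n 1).foldl (fun out k =>
    let t1 := PySem.Int.floordiv k w0
    let j := PySem.Int.mod k w0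
    let t2 := PySem.Int.floordiv t1 h0
    let i := PySem.Int.mod t1 h0
    let tile_c := PySem.Int.floordiv t2 H1
    let tile_r := PySem.Int.mod t2 H1
    out ++ [(tile_r * h0 + i) * Wp + tile_c * w0 + j]) []

-- ===== PRECONDITION & SPEC =====
-- A raises ZeroDivisionError exactly when h0 = 0 or w0 = 0 (Hp//h0, Wp//w0); those inputs are excluded.
def Pre_nz_order_indices (Hp : Int) (Wp : Int) (h0 : Int) (w0 : Int) : Prop := h0 ≠ 0 ∧ w0 ≠ 0
instance (Hp : Int) (Wp : Int) (h0 : Int) (w0 : Int) : Decidable (Pre_nz_order_indices Hp Wp h0 w0) := by unfold Pre_nz_order_indices; infer_instance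
def pvWitness_nz_order_indices : Int × Int × Int × Int := (4, 4, 2, 2)
def Spec_nz_order_indices (Hp : Int) (Wp : Int) (h0 : Int) (w0 : Int) (out : List Int) : Prop := out = nz_order_indices_alt Hp Wp h0 w0
instance (Hp : Int) (Wp : Int) (h0 : Int) (w0 : Int) (out : List Int) : Decidable (Spec_nz_order_indices Hp Wp h0 w0 out) := by unfold Spec_nz_order_indices; infer_instance

-- ===== CLAIM (what is proved, stated in full; the proofs are below) =====
def Claim_equal_nz_order_indices : Prop := ∀ (Hp : Int) (Wp : Int) (h0 : Int) (w0 : Int), Dom_nz_order_indices Hp Wp h0 w0 → Pre_nz_order_indices Hp Wp h0 w0 → Spec_nz_order_indices Hp Wp h0 w0 (nz_order_indices Hp Wp h0 w0)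

-- ===== LEMMAS AND PROOFS =====

theorem flatMap_const_nil {A B : Type} (l : List A) : l.flatMap (fun _ => ([] : List B)) = [] := by
  induction l <;> simp [*]

-- A's loop nest as nested flatMaps
theorem nz_A_flat (Hp Wp h0 w0 : Int) :
    nz_order_indices Hp Wp h0 w0 =
      (PySem.List.pyRange 0 (PySem.Int.floordiv Wp w0) 1).flatMap (fun tc =>
        (PySem.List.pyRange 0 (PySem.Int.floordiv Hp h0) 1).flatMap (fun tr =>
          (PySem.List.pyRange 0 h0 1).flatMap (fun i =>
            (PySem.List.pyRange 0 w0 1).map (fun j =>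
              (tr * h0 + i) * Wp + (tc * w0 + j))))) := by
  unfold nz_order_indices
  simp only [PySem.List.foldl_append_singleton_eq_map, PySem.List.foldl_append_eq_flatMap,
    List.nil_append]

-- flat range over a product splits into two nested ranges (quotient outer)
theorem range_mul_flatMap {α : Type} (a b : Nat) (f : Nat → Nat → List α) :
    (List.range (a * b)).flatMap (fun k => f (k / b) (k % b)) =
      (List.range a).flatMap (fun q => (List.range b).flatMap (fun r => f q r)) := by
  induction a with
  | zero => simp
  | succ a ih =>
    rw [Nat.succ_mul, List.range_add, List.flatMap_append, ih, List.range_succ,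
      List.flatMap_append, List.flatMap_map]
    congr 1
    simp only [List.flatMap_cons, List.flatMap_nil, List.append_nil]
    apply List.flatMap_congr
    intro r hr
    have hb : r < b := List.mem_range.mp hr
    have h1 : (a * b + r) / b = a := by
      rw [Nat.add_comm, Nat.mul_comm, Nat.add_mul_div_left _ _ (by omega)]
      rw [Nat.div_eq_of_lt hb]; omega
    have h2 : (a * b + r) % b = r := by
      rw [Nat.add_comm, Nat.mul_comm, Nat.add_mul_mod_self_left]
      exact Nat.mod_eq_of_lt hb
    rw [h1, h2]

-- the rank decode k ↦ (k/d/c/b, k/d/c%b, k/d%c, k%d) enumerates the four nested ranges in order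
theorem decode_flat {α : Type} (a b c d : Nat) (g : Nat → Nat → Nat → Nat → List α) :
    (List.range (a * b * c * d)).flatMap
        (fun k => g (k / d / c / b) (k / d / c % b) (k / d % c) (k % d)) =
      (List.range a).flatMap (fun tc => (List.range b).flatMap (fun tr =>
        (List.range c).flatMap (fun i => (List.range d).flatMap (fun j => g tc tr i j)))) := by
  have key : ∀ k : Nat,
      g (k / d / c / b) (k / d / c % b) (k / d % c) (k % d) =
      g (k / (b * (c * d))) (k % (b * (c * d)) / (c * d)) (k % (b * (c * d)) % (c * d) / d)
        (k % (b * (c * d)) % (c * d) % d) := by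
    intro k
    have h1 : k / (b * (c * d)) = k / d / c / b := by
      rw [Nat.div_div_eq_div_mul, Nat.div_div_eq_div_mul]; congr 1; ring
    have h2 : k % (b * (c * d)) / (c * d) = k / d / c % b := by
      rw [show b * (c * d) = (c * d) * b from by ring, Nat.mod_mul_right_div_self,
        show c * d = d * c from by ring, ← Nat.div_div_eq_div_mul]
    have h3 : k % (b * (c * d)) % (c * d) / d = k / d % c := by
      rw [Nat.mod_mod_of_dvd _ (dvd_mul_left (c * d) b),
        show c * d = d * c from by ring, Nat.mod_mul_right_div_self]
    have h4 : k % (b * (c * d)) % (c * d) % d = k % d := by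
      rw [Nat.mod_mod_of_dvd _ (dvd_mul_left (c * d) b), Nat.mod_mod_of_dvd _ (dvd_mul_left d c)]
    rw [h1, h2, h3, h4]
  calc (List.range (a * b * c * d)).flatMap
        (fun k => g (k / d / c / b) (k / d / c % b) (k / d % c) (k % d))
      = (List.range (a * (b * (c * d)))).flatMap
          (fun k => g (k / (b * (c * d))) (k % (b * (c * d)) / (c * d))
            (k % (b * (c * d)) % (c * d) / d) (k % (b * (c * d)) % (c * d) % d)) := by
        rw [show a * b * c * d = a * (b * (c * d)) from by ring]
        exact List.flatMap_congr (fun k _ => key k)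
    _ = (List.range a).flatMap (fun tc => (List.range (b * (c * d))).flatMap
          (fun s => g tc (s / (c * d)) (s % (c * d) / d) (s % (c * d) % d))) :=
        range_mul_flatMap a (b * (c * d))
          (fun q s => g q (s / (c * d)) (s % (c * d) / d) (s % (c * d) % d))
    _ = (List.range a).flatMap (fun tc => (List.range b).flatMap (fun tr =>
          (List.range (c * d)).flatMap (fun u => g tc tr (u / d) (u % d)))) :=
        List.flatMap_congr (fun tc _ =>
          range_mul_flatMap b (c * d) (fun tr u => g tc tr (u / d) (u % d)))
    _ = (List.range a).flatMap (fun tc => (List.range b).flatMap (fun tr =>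
          (List.range c).flatMap (fun i => (List.range d).flatMap (fun j => g tc tr i j)))) :=
        List.flatMap_congr (fun tc _ => List.flatMap_congr (fun tr _ =>
          range_mul_flatMap c d (fun i j => g tc tr i j)))

theorem nz_order_indices_eq (Hp Wp h0 w0 : Int) :
    nz_order_indices Hp Wp h0 w0 = nz_order_indices_alt Hp Wp h0 w0 := by
  unfold nz_order_indices_alt
  dsimp only
  by_cases hg : PySem.Int.floordiv Hp h0 ≤ 0 ∨ PySem.Int.floordiv Wp w0 ≤ 0 ∨ h0 ≤ 0 ∨ w0 ≤ 0
  · rw [if_pos hg, nz_A_flat]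
    rcases hg with h | h | h | h
    all_goals simp [PySem.List.pyRange_one_eq_nil h, flatMap_const_nil]
  · rw [if_neg hg]
    push_neg at hg
    obtain ⟨hH, hW, hh, hw⟩ := hg
    obtain ⟨b, hb⟩ : ∃ b : Nat, PySem.Int.floordiv Hp h0 = (b : Int) :=
      ⟨(PySem.Int.floordiv Hp h0).toNat, (Int.toNat_of_nonneg (le_of_lt hH)).symm⟩
    obtain ⟨a, ha⟩ : ∃ a : Nat, PySem.Int.floordiv Wp w0 = (a : Int) :=
      ⟨(PySem.Int.floordiv Wp w0).toNat, (Int.toNat_of_nonneg (le_of_lt hW)).symm⟩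
    obtain ⟨c, hc⟩ : ∃ c : Nat, h0 = (c : Int) :=
      ⟨h0.toNat, (Int.toNat_of_nonneg (le_of_lt hh)).symm⟩
    obtain ⟨d, hd⟩ : ∃ d : Nat, w0 = (d : Int) :=
      ⟨w0.toNat, (Int.toNat_of_nonneg (le_of_lt hw)).symm⟩
    rw [nz_A_flat, ha, hb, hc, hd]
    rw [show ((a : Int) * b * c * d) = ((a * b * c * d : Nat) : Int) from by push_cast; ring]
    rw [PySem.List.foldl_append_singleton_eq_map, List.nil_append]
    simp only [PySem.List.pyRange_zero_natCast, List.map_map, List.flatMap_map]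
    rw [List.map_eq_flatMap]
    simp only [Function.comp_def, PySem.Int.floordiv_natCast, PySem.Int.mod_natCast]
    rw [decode_flat a b c d (fun tc tr i j =>
      [((tr : Int) * c + i) * Wp + (tc : Int) * d + j])]
    apply List.flatMap_congr; intro tc _
    apply List.flatMap_congr; intro tr _
    apply List.flatMap_congr; intro i _
    rw [List.map_eq_flatMap]
    apply List.flatMap_congr; intro j _
    rw [show ((tr : Int) * c + i) * Wp + (tc : Int) * d + j
      = ((tr : Int) * c + i) * Wp + ((tc : Int) * d + j) from by ring]

-- ===== VERDICT (by name: the statement is the Claim_ definition above) =====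
theorem nz_order_indices_spec : Claim_equal_nz_order_indices := by
  intro Hp Wp h0 w0 _ _
  exact nz_order_indices_eq Hp Wp h0 w0
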